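-- pv_equiv track=rewrite | github.com/ilokhat/embankment_lsq | triangulation.py | get_segments_idx
-- ===== SOURCE A (Python) =====
-- def get_segments_idx(coords, tal_lengths):
--     to_remove = []
--     acc = 0
--     for e in tal_lengths[:-1]:
--         to_remove.append((e + acc - 1, e + acc))
--         acc += e
--     segs = [(i, i + 1) for i in range(len(coords)-1) if (i, i + 1) not in to_remove]
--     return segs
-- ===== SOURCE B (Python) =====
-- def get_segments_idx(coords, tal_lengths):
--     n = len(coords)
--     cuts = []
--     acc = 0
--     for e in tal_lengths[:-1]:
--         acc += e
--         cuts.append(acc - 1)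
--     valid = sorted({c for c in cuts if 0 <= c < n - 1})
--     segs = []
--     prev = 0
--     for c in valid:
--         segs.extend((i, i + 1) for i in range(prev, c))
--         prev = c + 1
--     segs.extend((i, i + 1) for i in range(prev, n - 1))
--     return segs
-- ===== Notes on version B (the rewrite author's own statement) =====
-- stated objective: faster
-- what changed: B replaces A's per-index membership test against a list of boundary pairs by sorting the distinct in-range cut indices once and emitting the contiguous index runs between consecutive cuts.
import Mathlib
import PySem

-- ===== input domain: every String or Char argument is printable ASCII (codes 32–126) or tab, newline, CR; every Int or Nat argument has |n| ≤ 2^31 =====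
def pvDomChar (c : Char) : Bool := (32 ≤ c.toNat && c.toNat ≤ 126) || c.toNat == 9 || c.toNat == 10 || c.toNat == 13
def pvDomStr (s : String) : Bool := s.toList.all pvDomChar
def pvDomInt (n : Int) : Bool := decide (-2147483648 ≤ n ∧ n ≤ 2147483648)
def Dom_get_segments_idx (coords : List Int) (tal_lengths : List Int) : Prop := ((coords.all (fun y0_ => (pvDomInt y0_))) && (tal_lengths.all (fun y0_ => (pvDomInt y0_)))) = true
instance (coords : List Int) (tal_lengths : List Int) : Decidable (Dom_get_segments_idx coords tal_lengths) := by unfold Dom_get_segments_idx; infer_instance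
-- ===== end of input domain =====

-- B sorts the distinct in-range cut indices once and emits the contiguous runs between
-- them, replacing A's per-index membership scan of a boundary-pair list with run emission.

-- ===== PORT A =====
def get_segments_idx (coords : List Int) (tal_lengths : List Int) : List (Int × Int) :=
  let to_remove :=
    ((PySem.List.slice tal_lengths none (some (-1))).foldl
      (fun (st : List (Int × Int) × Int) e =>
        (st.1 ++ [(e + st.2 - 1, e + st.2)], st.2 + e)) ([], 0)).1
  ((PySem.List.pyRange 0 ((coords.length : Int) - 1) 1).filter
      (fun i => !to_remove.contains (i, i + 1))).map (fun i => (i, i + 1))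

-- ===== PORT B =====
def get_segments_idx_alt (coords : List Int) (tal_lengths : List Int) : List (Int × Int) :=
  let n : Int := coords.length
  let cuts :=
    ((PySem.List.slice tal_lengths none (some (-1))).foldl
      (fun (st : List Int × Int) e =>
        let acc := st.2 + e
        (st.1 ++ [acc - 1], acc)) ([], 0)).1
  let valid := PySem.List.sorted
      (PySem.Set.ofList (cuts.filter (fun c => decide (0 ≤ c) && decide (c < n - 1))))
      (fun x => x) false
  let st := valid.foldl
      (fun (st : List (Int × Int) × Int) c =>
        (st.1 ++ (PySem.List.pyRange st.2 c 1).map (fun i => (i, i + 1)), c + 1)) ([], 0)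
  st.1 ++ (PySem.List.pyRange st.2 (n - 1) 1).map (fun i => (i, i + 1))

-- ===== PRECONDITION & SPEC =====
def Spec_get_segments_idx (coords : List Int) (tal_lengths : List Int) (out : List (Int × Int)) : Prop := out = get_segments_idx_alt coords tal_lengths
instance (coords : List Int) (tal_lengths : List Int) (out : List (Int × Int)) : Decidable (Spec_get_segments_idx coords tal_lengths out) := by unfold Spec_get_segments_idx; infer_instance

-- ===== CLAIM (what is proved, stated in full; the proofs are below) =====
def Claim_equal_get_segments_idx : Prop := ∀ (coords : List Int) (tal_lengths : List Int), Dom_get_segments_idx coords tal_lengths → Spec_get_segments_idx coords tal_lengths (get_segments_idx coords tal_lengths)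

-- ===== LEMMAS AND PROOFS =====

-- A's fold state is B's fold state with every cut c turned into the pair (c, c+1).
theorem foldA_eq_map_foldB (l : List Int) (pref : List Int) (acc : Int) :
    (l.foldl (fun (st : List (Int × Int) × Int) e =>
        (st.1 ++ [(e + st.2 - 1, e + st.2)], st.2 + e)) (pref.map (fun c => (c, c + 1)), acc))
      = (((l.foldl (fun (st : List Int × Int) e =>
            let acc := st.2 + e
            (st.1 ++ [acc - 1], acc)) (pref, acc)).1).map (fun c => (c, c + 1)),
         (l.foldl (fun (st : List Int × Int) e =>
            let acc := st.2 + e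
            (st.1 ++ [acc - 1], acc)) (pref, acc)).2) := by
  induction l generalizing pref acc with
  | nil => simp
  | cons e t ih =>
      simp only [List.foldl_cons]
      have h : (pref.map (fun c => (c, c + 1)) ++ [(e + acc - 1, e + acc)])
          = (pref ++ [acc + e - 1]).map (fun c => (c, c + 1)) := by
        simp; ring
      rw [h]
      have := ih (pref ++ [acc + e - 1]) (acc + e)
      simpa using this

theorem contains_map_pair (cuts : List Int) (i : Int) :
    (cuts.map (fun c => (c, c + 1))).contains (i, i + 1) = cuts.contains i := by
  simp

-- emission lemma: folding the run-emitter over a strictly increasing list of cuts in [lo, m)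
-- produces exactly the filtered pair list.
theorem emit_eq_filter (m : Int) (vs : List Int) (pref : List (Int × Int)) (lo : Int)
    (hsort : vs.Pairwise (· < ·)) (hbnd : ∀ c ∈ vs, lo ≤ c ∧ c < m) :
    (let st := vs.foldl
        (fun (st : List (Int × Int) × Int) c =>
          (st.1 ++ (PySem.List.pyRange st.2 c 1).map (fun i => (i, i + 1)), c + 1)) (pref, lo)
     st.1 ++ (PySem.List.pyRange st.2 m 1).map (fun i => (i, i + 1)))
    = pref ++ ((PySem.List.pyRange lo m 1).filter
        (fun i => !vs.contains i)).map (fun i => (i, i + 1)) := by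
  induction vs generalizing pref lo with
  | nil => simp
  | cons c cs ih =>
      obtain ⟨hlc, hcm⟩ := hbnd c (by simp)
      have hsplit : PySem.List.pyRange lo m 1
          = PySem.List.pyRange lo c 1 ++ PySem.List.pyRange c m 1 :=
        PySem.List.pyRange_one_append lo c m hlc (le_of_lt hcm)
      have hc2 : PySem.List.pyRange c m 1 = c :: PySem.List.pyRange (c + 1) m 1 :=
        PySem.List.pyRange_one_cons hcm
      have hgt : ∀ x ∈ cs, c < x := fun x hx => (List.pairwise_cons.mp hsort).1 x hx
      -- filter on the low part keeps everything
      have hlow : (PySem.List.pyRange lo c 1).filter (fun i => !(c :: cs).contains i)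
          = PySem.List.pyRange lo c 1 := by
        apply List.filter_eq_self.mpr
        intro i hi
        have hic : i < c := (PySem.List.mem_pyRange_one.mp hi).2
        have hnot : i ∉ c :: cs := by
          intro hmem
          rcases List.mem_cons.mp hmem with rfl | hx
          · omega
          · have := hgt i hx; omega
        simp [hnot]
      -- filter on the high part: c itself drops, cs decides the rest
      have hhigh : (PySem.List.pyRange (c + 1) m 1).filter (fun i => !(c :: cs).contains i)
          = (PySem.List.pyRange (c + 1) m 1).filter (fun i => !cs.contains i) := by
        apply List.filter_congr
        intro i hi
        have hic : c + 1 ≤ i := (PySem.List.mem_pyRange_one.mp hi).1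
        have : ¬ (i = c) := by omega
        simp [this]
      have hcself : (!(c :: cs).contains c) = false := by simp
      rw [hsplit, hc2]
      simp only [List.foldl_cons, List.filter_append, hlow]
      rw [List.filter_cons]
      simp only [hcself]
      rw [hhigh]
      have := ih (pref ++ (PySem.List.pyRange lo c 1).map (fun i => (i, i + 1))) (c + 1)
        (List.pairwise_cons.mp hsort).2
        (fun x hx => ⟨by have := hgt x hx; omega, (hbnd x (by simp [hx])).2⟩)
      simpa [List.map_append, List.append_assoc] using this

-- ===== VERDICT (by name: the statement is the Claim_ definition above) =====
theorem get_segments_idx_spec : Claim_equal_get_segments_idx := by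
  intro coords tal_lengths _
  unfold Spec_get_segments_idx get_segments_idx get_segments_idx_alt
  simp only []
  set l := PySem.List.slice tal_lengths none (some (-1)) with hl
  set n : Int := (coords.length : Int) with hn
  set cuts := ((l.foldl (fun (st : List Int × Int) e =>
      let acc := st.2 + e
      (st.1 ++ [acc - 1], acc)) ([], 0)).1) with hcuts
  have hto : ((l.foldl (fun (st : List (Int × Int) × Int) e =>
      (st.1 ++ [(e + st.2 - 1, e + st.2)], st.2 + e)) ([], 0)).1)
      = cuts.map (fun c => (c, c + 1)) := by
    have := foldA_eq_map_foldB l [] 0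
    simp only [List.map_nil] at this
    rw [this]
  rw [hto]
  set valid := PySem.List.sorted
      (PySem.Set.ofList (cuts.filter (fun c => decide (0 ≤ c) && decide (c < n - 1))))
      (fun x => x) false with hvalid
  have hsort : valid.Pairwise (· < ·) := by
    rw [hvalid]; exact PySem.List.sorted_ofList_pairwise_lt _
  have hmem : ∀ c, c ∈ valid ↔ (c ∈ cuts ∧ 0 ≤ c ∧ c < n - 1) := by
    intro c
    rw [hvalid, PySem.List.mem_sorted, PySem.Set.mem_ofList, List.mem_filter]
    simp
  have hbnd : ∀ c ∈ valid, (0 : Int) ≤ c ∧ c < n - 1 := fun c hc => ((hmem c).mp hc).2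
  have hemit := emit_eq_filter (n - 1) valid [] 0 hsort hbnd
  simp only [List.nil_append] at hemit
  rw [hemit]
  congr 1
  apply List.filter_congr
  intro i hi
  obtain ⟨hi0, hin⟩ := PySem.List.mem_pyRange_one.mp hi
  rw [contains_map_pair]
  congr 1
  simp only [List.contains_eq_mem, decide_eq_decide]
  constructor
  · intro hx; exact (hmem i).mpr ⟨hx, hi0, hin⟩
  · intro hx; exact ((hmem i).mp hx).1
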